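-- pv_equiv track=rewrite | github.com/bdefnet-personal/Advent-of-Code | 2025/Day_06/solution.py | get_num_digits_per_equation
-- ===== SOURCE A (Python) =====
-- def get_num_digits_per_equation(operations_dirty):
--     num_digits_per_equation = []
--
--     num_digits = 0
--     for i in range(len(operations_dirty)):
--         if i == 0:
--             num_digits += 1
--             continue
--         if operations_dirty[i] == " ":
--             num_digits += 1
--         else:
--             num_digits_per_equation.append(num_digits-1)
--             num_digits = 1
--     num_digits_per_equation.append(num_digits)
--     return num_digits_per_equation
-- ===== SOURCE B (Python) =====
-- def get_num_digits_per_equation(operations_dirty):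
--     s = operations_dirty
--     bounds = [0] + [i for i in range(1, len(s)) if s[i] != " "]
--     return [bounds[k + 1] - bounds[k] - 1 for k in range(len(bounds) - 1)] + [len(s) - bounds[-1]]
-- ===== Notes on version B (the rewrite author's own statement) =====
-- stated objective: alternative
-- what changed: Replaces A's running-counter-with-reset state machine by collecting the segment boundary indices (0 plus every non-space position >= 1) once and emitting consecutive differences minus one, plus len(s) minus the last boundary.
import Mathlib
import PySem

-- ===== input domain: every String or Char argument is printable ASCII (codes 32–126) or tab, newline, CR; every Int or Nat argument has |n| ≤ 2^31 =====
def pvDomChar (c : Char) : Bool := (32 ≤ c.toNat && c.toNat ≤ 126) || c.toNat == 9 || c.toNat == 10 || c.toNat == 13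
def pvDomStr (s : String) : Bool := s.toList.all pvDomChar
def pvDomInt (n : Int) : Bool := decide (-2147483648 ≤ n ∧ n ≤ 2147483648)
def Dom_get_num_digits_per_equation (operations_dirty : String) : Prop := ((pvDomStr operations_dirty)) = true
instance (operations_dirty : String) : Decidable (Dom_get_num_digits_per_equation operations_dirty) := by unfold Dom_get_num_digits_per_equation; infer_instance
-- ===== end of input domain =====

-- B replaces A's running-counter state machine by collecting the segment-boundary
-- indices once and taking consecutive differences (objective: alternative decomposition).

-- ===== PORT A =====
-- the loop body of A's for-loop (state = (num_digits_per_equation, num_digits))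
def pvStepA (cs : List Char) (acc : List Int × Int) (i : Int) : List Int × Int :=
  if i == 0 then (acc.1, acc.2 + 1)
  else if PySem.List.pyGetD cs i ' ' == ' ' then (acc.1, acc.2 + 1)
  else (acc.1 ++ [acc.2 - 1], 1)

def get_num_digits_per_equation (operations_dirty : String) : List Int :=
  let cs := operations_dirty.toList
  let st := (PySem.List.pyRange 0 (PySem.Str.len operations_dirty)).foldl (pvStepA cs) ([], 0)
  st.1 ++ [st.2]

-- ===== PORT B =====
-- bounds = [0] + [i for i in range(1, len(s)) if s[i] != " "]
def pvBounds (cs : List Char) : List Int :=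
  0 :: (PySem.List.pyRange 1 (cs.length : Int)).filter
    (fun i => !(PySem.List.pyGetD cs i ' ' == ' '))

def get_num_digits_per_equation_alt (operations_dirty : String) : List Int :=
  let cs := operations_dirty.toList
  let bounds := pvBounds cs
  (PySem.List.pyRange 0 ((bounds.length : Int) - 1)).map
      (fun k => PySem.List.pyGetD bounds (k + 1) 0 - PySem.List.pyGetD bounds k 0 - 1)
    ++ [PySem.Str.len operations_dirty - PySem.List.pyGetD bounds (-1) 0]

-- ===== PRECONDITION & SPEC =====
def Spec_get_num_digits_per_equation (operations_dirty : String) (out : List Int) : Prop := out = get_num_digits_per_equation_alt operations_dirty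
instance (operations_dirty : String) (out : List Int) : Decidable (Spec_get_num_digits_per_equation operations_dirty out) := by unfold Spec_get_num_digits_per_equation; infer_instance

-- ===== CLAIM (what is proved, stated in full; the proofs are below) =====
def Claim_equal_get_num_digits_per_equation : Prop := ∀ (operations_dirty : String), Dom_get_num_digits_per_equation operations_dirty → Spec_get_num_digits_per_equation operations_dirty (get_num_digits_per_equation operations_dirty)

-- ===== LEMMAS AND PROOFS =====

-- consecutive differences minus one, structurally
def pvDiffs : List Int → List Int
  | a :: b :: t => (b - a - 1) :: pvDiffs (b :: t)
  | _ => []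

-- the boundary indices B collects for the prefix of length m (plus the anchor 0)
def pvFilt (cs : List Char) (m : Nat) : List Int :=
  (PySem.List.pyRange 1 (m : Int)).filter (fun i => !(PySem.List.pyGetD cs i ' ' == ' '))

theorem pvDiffs_append_singleton (l : List Int) (a m : Int) :
    pvDiffs ((a :: l) ++ [m]) = pvDiffs (a :: l) ++ [m - (a :: l).getLastD 0 - 1] := by
  induction l generalizing a with
  | nil => simp [pvDiffs]
  | cons b t ih => simpa [pvDiffs] using ih b

theorem pvMapRange_diffs (l : List Int) (a : Int) :
    (List.range l.length).map
      (fun k => (a :: l).getD (k + 1) 0 - (a :: l).getD k 0 - 1) = pvDiffs (a :: l) := by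
  induction l generalizing a with
  | nil => simp [pvDiffs]
  | cons b t ih =>
    rw [List.length_cons, List.range_succ_eq_map, List.map_cons, List.map_map,
      show pvDiffs (a :: b :: t) = (b - a - 1) :: pvDiffs (b :: t) from rfl]
    refine congrArg₂ _ (by simp) ?_
    rw [← ih b]
    rfl

theorem pvFilt_succ (cs : List Char) (m : Nat) (hm : 1 ≤ m) :
    pvFilt cs (m + 1)
      = pvFilt cs m ++ (if !(PySem.List.pyGetD cs (m : Int) ' ' == ' ') then [(m : Int)] else []) := by
  unfold pvFilt
  rw [show ((m + 1 : Nat) : Int) = (m : Int) + 1 by push_cast; ring,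
    PySem.List.pyRange_one_succ_right (by exact_mod_cast hm), List.filter_append]
  by_cases h : cs[m]?.getD ' ' = ' ' <;> simp [h]

theorem pvLoopA (cs : List Char) (m : Nat) (hm : 1 ≤ m) :
    (PySem.List.pyRange 1 (m : Int)).foldl (pvStepA cs) ([], 1)
      = (pvDiffs (0 :: pvFilt cs m), (m : Int) - (0 :: pvFilt cs m).getLastD 0) := by
  induction m with
  | zero => omega
  | succ m ih =>
    by_cases h1 : 1 ≤ m
    · rw [show ((m + 1 : Nat) : Int) = (m : Int) + 1 by push_cast; ring,
        PySem.List.pyRange_one_succ_right (by exact_mod_cast h1), List.foldl_append, ih h1,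
        pvFilt_succ cs m h1]
      simp only [List.foldl_cons, List.foldl_nil]
      unfold pvStepA
      have hm0 : (((m : Int) == 0) = false) := by simp; omega
      simp only [PySem.List.pyGetD_natCast, hm0, Bool.false_eq_true, if_false]
      by_cases hsp : cs[m]?.getD ' ' = ' '
      · simp only [List.getD, hsp, beq_self_eq_true, if_true, Bool.not_true, Bool.false_eq_true,
          if_false, List.append_nil]
        refine Prod.ext rfl ?_
        simp only
        ring
      · have hb : ((cs.getD m ' ' == ' ') = false) := by simpa [List.getD] using hsp
        simp only [hb, Bool.false_eq_true, if_false, Bool.not_false, if_true]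
        refine Prod.ext ?_ ?_
        · simpa using (pvDiffs_append_singleton (pvFilt cs m) 0 (m : Int)).symm
        · simp only [← List.cons_append, List.getLastD_concat]
          ring
    · have hm1 : m = 0 := by omega
      subst hm1
      rw [show ((1 : Nat) : Int) = 1 from rfl, PySem.List.pyRange_one_eq_nil (le_refl 1)]
      simp [pvFilt, PySem.List.pyRange_one_eq_nil (le_refl 1), pvDiffs]

theorem pvBounds_eq (cs : List Char) : pvBounds cs = 0 :: pvFilt cs cs.length := rfl

theorem get_num_digits_per_equation_spec : Claim_equal_get_num_digits_per_equation := by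
  unfold Claim_equal_get_num_digits_per_equation
  intro s _
  unfold Spec_get_num_digits_per_equation
  unfold get_num_digits_per_equation get_num_digits_per_equation_alt
  simp only [PySem.Str.len_eq, pvBounds_eq]
  set cs := s.toList with hcs
  by_cases hn : cs.length = 0
  · have : cs = [] := List.eq_nil_of_length_eq_zero hn
    rw [this]
    simp [pvFilt, PySem.List.pyGetD, PySem.List.pyGet?, PySem.List.pyRange, PySem.List.pyIdx?]
  · have h1 : 1 ≤ cs.length := by omega
    rw [PySem.List.pyRange_one_cons (by exact_mod_cast h1)]
    simp only [List.foldl_cons]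
    rw [show pvStepA cs ([], 0) 0 = ([], 1) by simp [pvStepA], zero_add,
      pvLoopA cs cs.length h1]
    -- left: pvDiffs ++ [len - last]; right: B's map/append expression
    have hlb : (0 :: pvFilt cs cs.length).length - 1 = (pvFilt cs cs.length).length := by simp
    refine congrArg₂ _ ?_ ?_
    · rw [show (((0 :: pvFilt cs cs.length).length : Int) - 1) = ((pvFilt cs cs.length).length : Nat) by
        simp, PySem.List.pyRange_zero_natCast, List.map_map]
      rw [← pvMapRange_diffs (pvFilt cs cs.length) 0]
      refine List.map_congr_left ?_
      intro k _
      simp only [Function.comp]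
      rw [show ((k : Int) + 1) = ((k + 1 : Nat) : Int) by push_cast; ring,
        PySem.List.pyGetD_natCast, PySem.List.pyGetD_natCast]
    · rw [PySem.List.pyGetD_neg_one _ _ (by simp)]
      cases pvFilt cs cs.length with
      | nil => simp
      | cons b t => rw [List.getLast_eq_getLastD, List.getLastD_cons]
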